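-- pv_equiv track=rewrite | github.com/aviralSri23455/DocuMorph-AI---ERNIE-Multimodal-Document-Transformer | pdf2web-backend/app/services/plugin_service.py | _parse_events
-- ===== SOURCE A (Python) =====
-- from typing import Dict, List, Any, Optional, Callable
--
-- def _parse_events(content: str) -> List[Dict[str, str]]:
--     """Parse timeline events from content."""
--     events = []
--     lines = content.strip().split("\n")
--
--     current_event = {}
--     for line in lines:
--         line = line.strip().lstrip("-*•").strip()
--         if not line:
--             if current_event:
--                 events.append(current_event)
--                 current_event = {}
--             continue
--
--         # Try to parse date: title format
--         if ":" in line: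
--             parts = line.split(":", 1)
--             if len(parts) == 2:
--                 # Check if first part looks like a date
--                 if any(c.isdigit() for c in parts[0]):
--                     current_event["date"] = parts[0].strip()
--                     current_event["title"] = parts[1].strip()
--                 else:
--                     current_event["title"] = line
--         else:
--             if "title" not in current_event:
--                 current_event["title"] = line
--             else:
--                 current_event["description"] = current_event.get("description", "") + " " + line
--
--     if current_event:
--         events.append(current_event)
--
--     return events
-- ===== SOURCE B (Python) =====
-- from typing import Dict, List
--
--
-- def _clean(line: str) -> str:
--     return line.strip().lstrip("-*•").strip()
--
--
-- def _build_event(group: List[str]) -> Dict[str, str]: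
--     event = {}
--     for line in group:
--         if ":" in line:
--             left, right = line.split(":", 1)
--             if any(c.isdigit() for c in left):
--                 event["date"] = left.strip()
--                 event["title"] = right.strip()
--             else:
--                 event["title"] = line
--         elif "title" not in event:
--             event["title"] = line
--         else:
--             event["description"] = event.get("description", "") + " " + line
--     return event
--
--
-- def _parse_events(content: str) -> List[Dict[str, str]]:
--     lines = [_clean(l) for l in content.strip().split("\n")]
--     events = []
--     i, n = 0, len(lines)
--     while i < n:
--         if not lines[i]:
--             i += 1
--             continue
--         j = i
--         while j < n and lines[j]:
--             j += 1
--         events.append(_build_event(lines[i:j]))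
--         i = j
--     return events
-- ===== Notes on version B (the rewrite author's own statement) =====
-- stated objective: alternative
-- what changed: Replaces the single stateful loop with its current_event sentinel and end-of-loop flush by a clean-then-group decomposition: lines are cleaned once, partitioned into runs of consecutive non-empty lines, and each run is mapped through a small per-group event builder.
import Mathlib
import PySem

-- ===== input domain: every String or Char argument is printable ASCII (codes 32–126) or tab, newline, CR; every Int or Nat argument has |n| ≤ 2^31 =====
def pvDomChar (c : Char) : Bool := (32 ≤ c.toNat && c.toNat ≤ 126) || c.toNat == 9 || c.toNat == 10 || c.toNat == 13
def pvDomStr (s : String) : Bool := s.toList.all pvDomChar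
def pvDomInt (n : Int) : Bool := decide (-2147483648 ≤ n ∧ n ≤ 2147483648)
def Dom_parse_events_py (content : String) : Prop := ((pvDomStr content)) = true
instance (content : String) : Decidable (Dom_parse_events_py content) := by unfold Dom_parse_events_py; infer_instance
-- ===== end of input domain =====

-- B replaces A's stateful loop (current_event sentinel + end-of-loop flush) by a clean-then-group
-- decomposition: clean all lines, split them into runs of consecutive non-empty lines, map each run
-- through a per-group event builder (objective: alternative decomposition, same cost).

-- ===== PORT A =====
-- A's loop state is (events, current_event); the line is cleaned inside the loop body exactly as in
-- the Python; dict values are kept as List Char and turned into String only when the result is built.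
def parse_events_py (content : String) : List (List (String × String)) :=
  let lines := PySem.Chars.splitOn (PySem.Chars.strip content.toList) ['\n']
  let r := lines.foldl
    (fun (st : List (PySem.Dict String (List Char)) × PySem.Dict String (List Char)) rawline =>
      let line := PySem.Chars.strip
        (List.dropWhile (fun c => c == '-' || c == '*' || c == '•') (PySem.Chars.strip rawline))
      if line.isEmpty then
        (if st.2.size == 0 then st else (st.1 ++ [st.2], PySem.Dict.empty))
      else
        (st.1,
          if PySem.Chars.isIn [':'] line then
            let parts := PySem.Chars.splitOnMax line [':'] 1
            if parts.length == 2 then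
              if (parts.getD 0 []).any PySem.Chars.isdigit then
                (st.2.insert "date" (PySem.Chars.strip (parts.getD 0 []))).insert "title"
                  (PySem.Chars.strip (parts.getD 1 []))
              else st.2.insert "title" line
            else st.2
          else if st.2.contains "title" then
            st.2.insert "description" (st.2.getD "description" [] ++ [' '] ++ line)
          else st.2.insert "title" line))
    ([], PySem.Dict.empty)
  let events := if r.2.size == 0 then r.1 else r.1 ++ [r.2]
  events.map (fun d => d.items.map (fun p => (p.1, String.ofList p.2)))

-- ===== PORT B =====
-- _clean
def pvClean (cs : List Char) : List Char :=
  PySem.Chars.strip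
    (List.dropWhile (fun c => c == '-' || c == '*' || c == '•') (PySem.Chars.strip cs))

-- one iteration of _build_event's loop body
def pvStep (d : PySem.Dict String (List Char)) (line : List Char) : PySem.Dict String (List Char) :=
  if PySem.Chars.isIn [':'] line then
    let parts := PySem.Chars.splitOnMax line [':'] 1
    if parts.length == 2 then
      if (parts.getD 0 []).any PySem.Chars.isdigit then
        (d.insert "date" (PySem.Chars.strip (parts.getD 0 []))).insert "title"
          (PySem.Chars.strip (parts.getD 1 []))
      else d.insert "title" line
    else d
  else if d.contains "title" then
    d.insert "description" (d.getD "description" [] ++ [' '] ++ line)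
  else d.insert "title" line

-- _build_event
def pvBuildEvent (g : List (List Char)) : PySem.Dict String (List Char) :=
  g.foldl pvStep PySem.Dict.empty

-- the index scan of B's while loops: runs of consecutive non-empty lines
def pvGroups : List (List Char) → List (List (List Char))
  | [] => []
  | l :: ls =>
    if l.isEmpty then pvGroups ls
    else (l :: ls.takeWhile (fun x => !x.isEmpty)) :: pvGroups (ls.dropWhile (fun x => !x.isEmpty))
termination_by ls => ls.length
decreasing_by
  · simp
  · have := List.length_dropWhile_le (p := fun x : List Char => !x.isEmpty) (l := ls)
    simp only [List.length_cons]
    omega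

def parse_events_py_alt (content : String) : List (List (String × String)) :=
  let lines := (PySem.Chars.splitOn (PySem.Chars.strip content.toList) ['\n']).map pvClean
  (pvGroups lines).map (fun g => (pvBuildEvent g).items.map (fun p => (p.1, String.ofList p.2)))

-- ===== PRECONDITION & SPEC =====
def Spec_parse_events_py (content : String) (out : List (List (String × String))) : Prop := out = parse_events_py_alt content
instance (content : String) (out : List (List (String × String))) : Decidable (Spec_parse_events_py content out) := by unfold Spec_parse_events_py; infer_instance

-- ===== CLAIM (what is proved, stated in full; the proofs are below) =====
def Claim_equal_parse_events_py : Prop := ∀ (content : String), Dom_parse_events_py content → Spec_parse_events_py content (parse_events_py content)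

-- ===== LEMMAS AND PROOFS =====

-- A's loop body, on an already-cleaned line
def pvGA (st : List (PySem.Dict String (List Char)) × PySem.Dict String (List Char))
    (line : List Char) : List (PySem.Dict String (List Char)) × PySem.Dict String (List Char) :=
  if line.isEmpty then
    (if st.2.size == 0 then st else (st.1 ++ [st.2], PySem.Dict.empty))
  else (st.1, pvStep st.2 line)

lemma pv_goA (fuel : Nat) (l cur : List Char) (acc : List (List Char)) :
    ∃ a, PySem.Chars.splitOnMax.go [':'] fuel 0 l cur acc = (a :: acc).reverse := by
  cases fuel with
  | zero => exact ⟨cur.reverse ++ l, by simp [PySem.Chars.splitOnMax.go]⟩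
  | succ f =>
    cases l with
    | nil => exact ⟨cur.reverse, by simp [PySem.Chars.splitOnMax.go]⟩
    | cons c rest => exact ⟨cur.reverse ++ (c :: rest), by simp [PySem.Chars.splitOnMax.go]⟩

lemma pv_goB (fuel : Nat) : ∀ (l cur : List Char) (acc : List (List Char)),
    l.length < fuel → ':' ∈ l →
    ∃ a b, PySem.Chars.splitOnMax.go [':'] fuel 1 l cur acc = acc.reverse ++ [a, b] := by
  induction fuel with
  | zero => intro l cur acc h _; omega
  | succ f ih =>
    intro l cur acc hlen hmem
    cases l with
    | nil => simp at hmem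
    | cons c rest =>
      by_cases hc : c = ':'
      · subst hc
        have hpre : [':'].isPrefixOf (':' :: rest) = true := by simp [List.isPrefixOf]
        obtain ⟨a, ha⟩ := pv_goA f rest [] (cur.reverse :: acc)
        refine ⟨cur.reverse, a, ?_⟩
        simp only [PySem.Chars.splitOnMax.go, hpre, if_true]
        simp only [List.length_cons, List.length_nil] at ha ⊢
        norm_num
        rw [ha]
        simp
      · have hpre : [':'].isPrefixOf (c :: rest) = false := by
          simp [List.isPrefixOf]
          exact fun h => hc h.symm
        have hmem' : ':' ∈ rest := by
          rcases List.mem_cons.mp hmem with h | h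
          · exact absurd h.symm hc
          · exact h
        obtain ⟨a, b, hab⟩ := ih rest (c :: cur) acc (by simp at hlen; omega) hmem'
        refine ⟨a, b, ?_⟩
        simp only [PySem.Chars.splitOnMax.go, hpre]
        norm_num
        exact hab

lemma pv_colon_split (s : List Char) (h : PySem.Chars.isIn [':'] s = true) :
    ∃ a b, PySem.Chars.splitOnMax s [':'] 1 = [a, b] := by
  have hmem : ':' ∈ s := by
    obtain ⟨pre, suf, rfl⟩ := (PySem.Chars.isIn_iff_infix _ _).mp h
    simp
  obtain ⟨a, b, hab⟩ := pv_goB (s.length + 1) s [] [] (by omega) hmem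
  exact ⟨a, b, by simpa [PySem.Chars.splitOnMax] using hab⟩

lemma pv_insert_size {d : PySem.Dict String (List Char)} {k : String} {v : List Char} :
    (d.insert k v).size ≠ 0 := by
  rw [PySem.Dict.size_insert]
  split_ifs with h
  · intro h0
    rcases d with ⟨items⟩
    cases items with
    | nil => simp [PySem.Dict.contains] at h
    | cons p rest => simp [PySem.Dict.size] at h0
  · omega

lemma pv_step_size (d : PySem.Dict String (List Char)) (l : List Char) (hl : ¬ l.isEmpty = true) :
    ¬ (pvStep d l).size = 0 := by
  unfold pvStep
  by_cases hcolon : PySem.Chars.isIn [':'] l = true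
  · obtain ⟨a, b, hab⟩ := pv_colon_split l hcolon
    simp only [hcolon, if_true, hab,
      show (([a, b] : List (List Char)).length == 2) = true from rfl,
      List.getD_cons_zero, List.getD_cons_succ]
    split_ifs <;> exact pv_insert_size
  · rw [if_neg hcolon]
    split_ifs <;> exact pv_insert_size

lemma pv_size_zero {d : PySem.Dict String (List Char)} (h : d.size = 0) :
    d = PySem.Dict.empty := by
  rcases d with ⟨items⟩
  cases items with
  | nil => rfl
  | cons p rest => simp [PySem.Dict.size] at h

lemma pv_loop (ls : List (List Char)) :
    ∀ (evs : List (PySem.Dict String (List Char))) (cur : PySem.Dict String (List Char)),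
    (if ((ls.foldl pvGA (evs, cur)).2.size == 0) = true then (ls.foldl pvGA (evs, cur)).1
      else (ls.foldl pvGA (evs, cur)).1 ++ [(ls.foldl pvGA (evs, cur)).2])
    = evs ++ (if cur.size = 0 then (pvGroups ls).map pvBuildEvent
        else ((ls.takeWhile (fun x => !x.isEmpty)).foldl pvStep cur)
              :: (pvGroups (ls.dropWhile (fun x => !x.isEmpty))).map pvBuildEvent) := by
  induction ls with
  | nil =>
    intro evs cur
    by_cases h : cur.size = 0 <;> simp [pvGroups, h]
  | cons l ls ih =>
    intro evs cur
    simp only [List.foldl_cons]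
    by_cases hl : l.isEmpty = true
    · by_cases hc : cur.size = 0
      · have hcur : cur = PySem.Dict.empty := pv_size_zero hc
        subst hcur
        have hga : pvGA (evs, PySem.Dict.empty) l = (evs, PySem.Dict.empty) := by
          simp [pvGA, hl, PySem.Dict.size, PySem.Dict.empty]
        rw [hga, ih]
        simp [pvGroups, hl, PySem.Dict.size, PySem.Dict.empty]
      · have hga : pvGA (evs, cur) l = (evs ++ [cur], PySem.Dict.empty) := by
          simp [pvGA, hl, hc]
        rw [hga, ih]
        have hne : (fun x : List Char => !x.isEmpty) l = false := by simp [hl]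
        have hcc : ¬cur.items = [] := fun h => hc (by simp [PySem.Dict.size, h])
        simp [pvGroups, hl, hcc, PySem.Dict.size, PySem.Dict.empty,
          List.takeWhile_cons, List.dropWhile_cons, hne]
    · have hga : pvGA (evs, cur) l = (evs, pvStep cur l) := by simp [pvGA, hl]
      have hne : (fun x : List Char => !x.isEmpty) l = true := by simp [hl]
      rw [hga, ih, if_neg (pv_step_size cur l hl)]
      by_cases hc : cur.size = 0
      · have hcur : cur = PySem.Dict.empty := pv_size_zero hc
        subst hcur
        rw [if_pos hc]
        simp only [pvGroups, hl, if_false, List.map_cons, List.takeWhile_cons, List.dropWhile_cons,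
          hne, Bool.false_eq_true, ite_false, ite_true]
        congr 1
      · rw [if_neg hc]
        simp [List.takeWhile_cons, List.dropWhile_cons, hne, pvBuildEvent]

-- ===== VERDICT (by name: the statement is the Claim_ definition above) =====
theorem parse_events_py_spec : Claim_equal_parse_events_py := by
  intro content _
  unfold Spec_parse_events_py
  simp only [parse_events_py, parse_events_py_alt]
  rw [show (fun (st : List (PySem.Dict String (List Char)) × PySem.Dict String (List Char)) rawline =>
      let line := PySem.Chars.strip
        (List.dropWhile (fun c => c == '-' || c == '*' || c == '•') (PySem.Chars.strip rawline))
      if line.isEmpty then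
        (if st.2.size == 0 then st else (st.1 ++ [st.2], PySem.Dict.empty))
      else
        (st.1,
          if PySem.Chars.isIn [':'] line then
            let parts := PySem.Chars.splitOnMax line [':'] 1
            if parts.length == 2 then
              if (parts.getD 0 []).any PySem.Chars.isdigit then
                (st.2.insert "date" (PySem.Chars.strip (parts.getD 0 []))).insert "title"
                  (PySem.Chars.strip (parts.getD 1 []))
              else st.2.insert "title" line
            else st.2
          else if st.2.contains "title" then
            st.2.insert "description" (st.2.getD "description" [] ++ [' '] ++ line)
          else st.2.insert "title" line))
    = (fun st raw => pvGA st (pvClean raw)) from rfl]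
  rw [← List.foldl_map]
  rw [pv_loop]
  simp [PySem.Dict.size, PySem.Dict.empty, List.map_map]
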